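-- pv_equiv track=rewrite | github.com/darshil971/monthly-report-job- | src/report/analysis.py | has_insufficient_data_themes
-- ===== SOURCE A (Python) =====
-- from typing import List, Optional, Tuple
--
-- def has_insufficient_data_themes(themes_list: List[str]) -> bool:
--     """Check if theme list contains patterns indicating insufficient data."""
--     if not themes_list:
--         return True
--
--     insufficient_patterns = [
--         'no statistically significant patterns',
--         'insufficient data for theme extraction',
--         'insufficient message volume',
--         'not enough data',
--         'no patterns detected'
--     ]
--
--     for theme in themes_list:
--         theme_lower = theme.lower().strip()
--         for pattern in insufficient_patterns:
--             if pattern in theme_lower: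
--                 return True
--     return False
-- ===== SOURCE B (Python) =====
-- def _candidates(ch):
--     # all insufficient-data phrases start with 'n' or 'i': dispatch on the first letter
--     if ch == 'n':
--         return ('no statistically significant patterns',
--                 'not enough data',
--                 'no patterns detected')
--     if ch == 'i':
--         return ('insufficient data for theme extraction',
--                 'insufficient message volume')
--     return ()
--
-- def has_insufficient_data_themes(themes_list):
--     """Check if theme list contains patterns indicating insufficient data."""
--     if not themes_list:
--         return True
--     for theme in themes_list:
--         t = theme.lower().strip()
--         for i in range(len(t)):
--             for p in _candidates(t[i]):
--                 if t.startswith(p, i):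
--                     return True
--     return False
-- ===== Notes on version B (the rewrite author's own statement) =====
-- stated objective: alternative
-- what changed: B replaces the five independent substring-membership ('in') tests per theme by a single left-to-right positional scan: at each index it dispatches on the character through a first-letter candidate table ('n'/'i') and checks startswith at that position; same asymptotic cost, different search strategy.
import Mathlib
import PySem

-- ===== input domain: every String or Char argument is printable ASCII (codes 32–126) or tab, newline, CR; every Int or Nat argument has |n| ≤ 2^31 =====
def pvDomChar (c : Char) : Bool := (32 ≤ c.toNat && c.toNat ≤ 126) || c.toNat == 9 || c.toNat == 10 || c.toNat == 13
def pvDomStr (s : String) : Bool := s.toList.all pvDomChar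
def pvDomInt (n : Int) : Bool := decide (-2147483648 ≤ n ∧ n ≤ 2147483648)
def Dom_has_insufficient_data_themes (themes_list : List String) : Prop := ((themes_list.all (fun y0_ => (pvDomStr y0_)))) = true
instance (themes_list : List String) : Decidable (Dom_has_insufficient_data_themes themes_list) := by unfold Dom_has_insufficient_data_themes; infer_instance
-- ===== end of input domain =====

-- B replaces the five substring-membership tests by one positional scan per theme with a
-- first-letter dispatch table and startswith checks at each position; same results everywhere.

-- ===== PORT A =====
-- outer loop over themes; per theme: lower().strip(), inner loop over patterns, early return on hit
def has_insufficient_data_themes (themes_list : List String) : Bool :=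
  if themes_list = [] then true
  else
    let insufficient_patterns : List String :=
      ["no statistically significant patterns",
       "insufficient data for theme extraction",
       "insufficient message volume",
       "not enough data",
       "no patterns detected"]
    themes_list.any (fun theme =>
      let theme_lower := PySem.Str.strip (PySem.Str.lower theme)
      insufficient_patterns.any (fun pattern => PySem.Str.isIn pattern theme_lower))

-- ===== PORT B =====
-- first-letter dispatch table (Python helper _candidates)
def pvCandidates (ch : Char) : List (List Char) :=
  if ch = 'n' then
    ["no statistically significant patterns".toList,
     "not enough data".toList,
     "no patterns detected".toList]
  else if ch = 'i' then
    ["insufficient data for theme extraction".toList,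
     "insufficient message volume".toList]
  else []

-- per theme: one scan over the positions; t[i] dispatches, t.startswith(p, i) checks
def has_insufficient_data_themes_alt (themes_list : List String) : Bool :=
  if themes_list = [] then true
  else
    themes_list.any (fun theme =>
      let t := (PySem.Str.strip (PySem.Str.lower theme)).toList
      (List.range t.length).any (fun i =>
        (pvCandidates (t.getD i ' ')).any (fun p =>
          PySem.Chars.startswith (t.drop i) p)))

-- ===== PRECONDITION & SPEC =====
def Spec_has_insufficient_data_themes (themes_list : List String) (out : Bool) : Prop := out = has_insufficient_data_themes_alt themes_list
instance (themes_list : List String) (out : Bool) : Decidable (Spec_has_insufficient_data_themes themes_list out) := by unfold Spec_has_insufficient_data_themes; infer_instance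

-- ===== CLAIM =====
def Claim_equal_has_insufficient_data_themes : Prop := ∀ (themes_list : List String), Dom_has_insufficient_data_themes themes_list → Spec_has_insufficient_data_themes themes_list (has_insufficient_data_themes themes_list)

-- ===== LEMMAS AND PROOFS =====

-- the concrete pattern lists agree: every candidate is a pattern, and each pattern
-- (nonempty, with known first letter) is among the candidates of its first letter
theorem pv_candidates_sub {ch : Char} {p : List Char}
    (hp : p ∈ pvCandidates ch) :
    p ∈ (["no statistically significant patterns",
          "insufficient data for theme extraction",
          "insufficient message volume",
          "not enough data",
          "no patterns detected"] : List String).map String.toList := by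
  unfold pvCandidates at hp
  split_ifs at hp <;> simp_all [List.mem_cons]
  · rcases hp with h | h | h <;> simp [h]
  · rcases hp with h | h <;> simp [h]

-- per theme equivalence of the two inner searches
theorem pv_scan_iff (t : List Char) :
    ((["no statistically significant patterns",
       "insufficient data for theme extraction",
       "insufficient message volume",
       "not enough data",
       "no patterns detected"] : List String).any
        (fun pattern => PySem.Chars.isIn pattern.toList t))
    = (List.range t.length).any (fun i =>
        (pvCandidates (t.getD i ' ')).any (fun p =>
          PySem.Chars.startswith (t.drop i) p)) := by
  rw [Bool.eq_iff_iff]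
  simp only [List.any_eq_true, List.mem_range]
  constructor
  · rintro ⟨pat, hpat, hin⟩
    rw [← PySem.Chars.exists_prefix_drop_iff_isIn] at hin
    obtain ⟨j, hpre⟩ := hin
    have hne : pat.toList ≠ [] := by
      fin_cases hpat <;> decide
    have hdropne : t.drop j ≠ [] := by
      intro h
      rw [h] at hpre
      exact hne (List.prefix_nil.mp hpre)
    have hj : j < t.length := by
      by_contra h
      exact hdropne (List.drop_eq_nil_of_le (le_of_not_gt h))
    refine ⟨j, hj, pat.toList, ?_, (PySem.Chars.startswith_iff _ _).mpr hpre⟩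
    -- t.getD j ' ' is pat's first character, so pat is among the candidates
    have hhead : t[j]? = some (pat.toList.headI) := by
      have h1 : (t.drop j).head? = t[j]? := List.head?_drop
      obtain ⟨s, hs⟩ := hpre
      rw [← h1, ← hs]
      fin_cases hpat <;> simp
    have hgetD : t.getD j ' ' = pat.toList.headI := by
      simp [List.getD_eq_getElem?_getD, hhead]
    rw [hgetD]
    fin_cases hpat <;> decide
  · rintro ⟨i, hi, p, hp, hsw⟩
    have hmem := pv_candidates_sub hp
    simp only [List.mem_map] at hmem
    obtain ⟨pat, hpat, rfl⟩ := hmem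
    refine ⟨pat, hpat, ?_⟩
    rw [← PySem.Chars.exists_prefix_drop_iff_isIn]
    exact ⟨i, (PySem.Chars.startswith_iff _ _).mp hsw⟩

-- ===== VERDICT =====
theorem has_insufficient_data_themes_spec : Claim_equal_has_insufficient_data_themes := by
  intro themes_list _
  unfold Spec_has_insufficient_data_themes
  unfold has_insufficient_data_themes has_insufficient_data_themes_alt
  split
  · rfl
  · have hfun : (fun theme =>
        (["no statistically significant patterns",
          "insufficient data for theme extraction",
          "insufficient message volume",
          "not enough data",
          "no patterns detected"] : List String).any
          (fun pattern => PySem.Str.isIn pattern (PySem.Str.strip (PySem.Str.lower theme))))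
      = (fun theme =>
          (List.range ((PySem.Str.strip (PySem.Str.lower theme)).toList).length).any (fun i =>
            (pvCandidates (((PySem.Str.strip (PySem.Str.lower theme)).toList).getD i ' ')).any (fun p =>
              PySem.Chars.startswith (((PySem.Str.strip (PySem.Str.lower theme)).toList).drop i) p))) := by
      funext theme
      have h := pv_scan_iff ((PySem.Str.strip (PySem.Str.lower theme)).toList)
      simpa using h
    exact congrArg themes_list.any hfun
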